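-- pv_equiv track=rewrite | github.com/AvianJay/useless-script | discord/Moderate.py | get_time_text
-- ===== SOURCE A (Python) =====
-- def get_time_text(seconds: int) -> str:
--     final = ""
--     while seconds != 0:
--         if seconds < 60:
--             final += f" {seconds} 秒"
--             seconds = 0
--         elif seconds < 3600:
--             final += f" {seconds // 60} 分鐘"
--             seconds = seconds % 60
--         elif seconds < 86400:
--             final += f" {seconds // 3600} 小時"
--             seconds = seconds % 3600
--         else:
--             final += f" {seconds // 86400} 天"
--             seconds = seconds % 86400
--     return final.strip()
-- ===== SOURCE B (Python) =====
-- def get_time_text(seconds: int) -> str: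
--     if seconds < 60:
--         return f"{seconds} 秒" if seconds != 0 else ""
--     days, r = divmod(seconds, 86400)
--     hours, r = divmod(r, 3600)
--     minutes, secs = divmod(r, 60)
--     parts = []
--     for value, unit in ((days, "天"), (hours, "小時"), (minutes, "分鐘"), (secs, "秒")):
--         if value != 0:
--             parts.append(f"{value} {unit}")
--     return " ".join(parts)
-- ===== Notes on version B (the rewrite author's own statement) =====
-- stated objective: simpler
-- what changed: Replaced the magnitude-testing while loop that repeatedly re-dispatches on the remaining seconds with a straight-line divmod decomposition into days/hours/minutes/seconds followed by a filter of the non-zero units and a single ' '.join.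
import Mathlib
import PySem

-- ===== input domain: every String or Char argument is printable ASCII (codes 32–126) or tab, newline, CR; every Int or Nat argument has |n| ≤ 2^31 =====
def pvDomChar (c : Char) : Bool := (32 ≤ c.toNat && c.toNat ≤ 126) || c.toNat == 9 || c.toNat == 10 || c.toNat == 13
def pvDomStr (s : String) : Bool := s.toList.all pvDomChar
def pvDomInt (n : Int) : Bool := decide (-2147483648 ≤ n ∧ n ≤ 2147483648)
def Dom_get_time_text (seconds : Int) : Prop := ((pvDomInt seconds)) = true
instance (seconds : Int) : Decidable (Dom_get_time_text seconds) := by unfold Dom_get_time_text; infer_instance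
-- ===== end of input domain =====

-- B replaces A's magnitude-testing while loop by one straight-line divmod decomposition plus a
-- filter-and-join of the non-zero units (objective: simpler; same values everywhere).

-- ===== PORT A =====
-- A's while loop: each iteration appends " <value> <unit>" and shrinks `seconds`.
-- In the `seconds < 60` branch Python sets seconds = 0 and the loop then exits,
-- so that branch returns the accumulated string directly.
def pvLoopA (final : List Char) (seconds : Int) : List Char :=
  if _h0 : seconds = 0 then final
  else if _h1 : seconds < 60 then
    final ++ ' ' :: PySem.Int.toChars seconds ++ ' ' :: ['秒']
  else if _h2 : seconds < 3600 then
    pvLoopA (final ++ ' ' :: PySem.Int.toChars (PySem.Int.floordiv seconds 60) ++ ' ' :: ['分', '鐘'])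
      (PySem.Int.mod seconds 60)
  else if _h3 : seconds < 86400 then
    pvLoopA (final ++ ' ' :: PySem.Int.toChars (PySem.Int.floordiv seconds 3600) ++ ' ' :: ['小', '時'])
      (PySem.Int.mod seconds 3600)
  else
    pvLoopA (final ++ ' ' :: PySem.Int.toChars (PySem.Int.floordiv seconds 86400) ++ ' ' :: ['天'])
      (PySem.Int.mod seconds 86400)
termination_by seconds.toNat
decreasing_by
  · have h1 := PySem.Int.mod_nonneg seconds (b := 60) (by norm_num)
    have h2 := PySem.Int.mod_lt seconds (b := 60) (by norm_num)
    omega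
  · have h1 := PySem.Int.mod_nonneg seconds (b := 3600) (by norm_num)
    have h2 := PySem.Int.mod_lt seconds (b := 3600) (by norm_num)
    omega
  · have h1 := PySem.Int.mod_nonneg seconds (b := 86400) (by norm_num)
    have h2 := PySem.Int.mod_lt seconds (b := 86400) (by norm_num)
    omega

def get_time_text (seconds : Int) : String :=
  String.ofList (PySem.Chars.strip (pvLoopA [] seconds))

-- ===== PORT B =====
def pvFmtB (p : Int × List Char) : List Char :=
  PySem.Int.toChars p.1 ++ ' ' :: p.2      -- f"{value} {unit}"

def get_time_text_alt (seconds : Int) : String :=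
  if seconds < 60 then
    if seconds ≠ 0 then String.ofList (pvFmtB (seconds, ['秒'])) else ""
  else
    let d  := PySem.Int.floordiv seconds 86400
    let r1 := PySem.Int.mod seconds 86400
    let h  := PySem.Int.floordiv r1 3600
    let r2 := PySem.Int.mod r1 3600
    let m  := PySem.Int.floordiv r2 60
    let sc := PySem.Int.mod r2 60
    let parts := [(d, ['天']), (h, ['小', '時']), (m, ['分', '鐘']), (sc, ['秒'])].foldl
      (fun acc p => if p.1 ≠ 0 then acc ++ [pvFmtB p] else acc) []
    String.ofList (PySem.Chars.join [' '] parts)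

-- ===== PRECONDITION & SPEC =====
def Spec_get_time_text (seconds : Int) (out : String) : Prop := out = get_time_text_alt seconds
instance (seconds : Int) (out : String) : Decidable (Spec_get_time_text seconds out) := by unfold Spec_get_time_text; infer_instance

-- ===== CLAIM (what is proved, stated in full; the proofs are below) =====
def Claim_equal_get_time_text : Prop := ∀ (seconds : Int), Dom_get_time_text seconds → Spec_get_time_text seconds (get_time_text seconds)

-- ===== LEMMAS AND PROOFS =====

-- a segment as A emits it (leading space), skipped when the value is 0
def pvOptseg (v : Int) (u : List Char) : List Char :=
  if v = 0 then [] else ' ' :: pvFmtB (v, u)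

def pvCatseg (ps : List (Int × List Char)) : List Char :=
  ps.foldr (fun p acc => pvOptseg p.1 p.2 ++ acc) []

def pvParts (ps : List (Int × List Char)) : List (List Char) :=
  (ps.filter (fun p => decide (p.1 ≠ 0))).map pvFmtB

-- head and last are non-whitespace
def pvGood (p : List Char) : Prop :=
  (∃ c t, p = c :: t ∧ PySem.Chars.isspace c = false) ∧
    PySem.Chars.isspace (p.getLastD 'x') = false

theorem pvToDigitsCore_shape (fuel : Nat) : ∀ (n : Nat) (ds : List Char),
    ∃ l, Nat.toDigitsCore 10 fuel n ds = l ++ ds ∧ (0 < fuel → l ≠ []) ∧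
      ∀ c ∈ l, PySem.Chars.isspace c = false := by
  induction fuel with
  | zero => intro n ds; exact ⟨[], rfl, by simp, by simp⟩
  | succ fuel ih =>
    intro n ds
    have hd : PySem.Chars.isspace (Nat.digitChar (n % 10)) = false := by
      have h10 : n % 10 < 10 := Nat.mod_lt _ (by norm_num)
      interval_cases h : n % 10 <;> decide
    rw [Nat.toDigitsCore]
    by_cases h : n / 10 = 0
    · refine ⟨[Nat.digitChar (n % 10)], ?_, by simp, by simpa using hd⟩
      simp [h]
    · obtain ⟨l, hl, _, hsp⟩ := ih (n / 10) (Nat.digitChar (n % 10) :: ds)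
      refine ⟨l ++ [Nat.digitChar (n % 10)], ?_, by simp, ?_⟩
      · simp [h, hl]
      · intro c hc
        rcases List.mem_append.mp hc with h' | h'
        · exact hsp c h'
        · have hc' : c = (n % 10).digitChar := by simpa using h'
          rw [hc']; exact hd

theorem pvToChars_shape (n : Int) :
    PySem.Int.toChars n ≠ [] ∧ ∀ c ∈ PySem.Int.toChars n, PySem.Chars.isspace c = false := by
  unfold PySem.Int.toChars
  split
  · obtain ⟨l, hl, hne, hsp⟩ := pvToDigitsCore_shape (n.natAbs + 1) n.natAbs []
    rw [Nat.toDigits, hl]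
    refine ⟨by simp, ?_⟩
    intro c hc
    rcases List.mem_cons.mp hc with h' | h'
    · subst h'; decide
    · exact hsp c (by simpa using h')
  · obtain ⟨l, hl, hne, hsp⟩ := pvToDigitsCore_shape (n.toNat + 1) n.toNat []
    rw [Nat.toDigits, hl]
    exact ⟨by simpa using hne (by omega), fun c hc => hsp c (by simpa using hc)⟩

theorem pvGetLastD_append (l1 l2 : List Char) (d : Char) (h : l2 ≠ []) :
    (l1 ++ l2).getLastD d = l2.getLastD d := by
  cases l2 with
  | nil => exact absurd rfl h
  | cons x xs =>
    rw [List.getLastD_eq_getLast?, List.getLastD_eq_getLast?,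
      List.getLast?_append_of_ne_nil _ h]

theorem pvGood_fmt (v : Int) (u : List Char) (hu : u ≠ [])
    (hul : PySem.Chars.isspace (u.getLastD 'x') = false) : pvGood (pvFmtB (v, u)) := by
  obtain ⟨hne, hsp⟩ := pvToChars_shape v
  obtain ⟨c, t, hct⟩ := List.exists_cons_of_ne_nil hne
  constructor
  · exact ⟨c, t ++ ' ' :: u, by simp [pvFmtB, hct], hsp c (by simp [hct])⟩
  · have hsplit : pvFmtB (v, u) = (PySem.Int.toChars v ++ [' ']) ++ u := by
      simp [pvFmtB]
    rw [hsplit, pvGetLastD_append _ _ _ hu]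
    exact hul

theorem pvGood_join (parts : List (List Char)) (hne : parts ≠ [])
    (hall : ∀ p ∈ parts, pvGood p) : pvGood (PySem.Chars.join [' '] parts) := by
  induction parts with
  | nil => exact absurd rfl hne
  | cons a l ih =>
    cases l with
    | nil => simpa [PySem.Chars.join_singleton] using hall a (by simp)
    | cons b l' =>
      rw [PySem.Chars.join_cons_cons]
      have hj := ih (by simp) (fun p hp => hall p (by simp [hp]))
      obtain ⟨⟨c, t, hct, hc⟩, hlast⟩ := hall a (by simp)
      obtain ⟨⟨c', t', hct', _⟩, hlast'⟩ := hj
      constructor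
      · exact ⟨c, t ++ ' ' :: PySem.Chars.join [' '] (b :: l'), by simp [hct], hc⟩
      · rw [List.append_assoc, pvGetLastD_append _ _ _ (by simp),
          pvGetLastD_append _ _ _ (by simp [hct'])]
        exact hlast' 

theorem pvStrip_space_cons (y : List Char) (h : pvGood y) :
    PySem.Chars.strip (' ' :: y) = y := by
  obtain ⟨⟨c, t, hct, hc⟩, hlast⟩ := h
  subst hct
  unfold PySem.Chars.strip PySem.Chars.lstrip PySem.Chars.rstrip
  rw [List.dropWhile_cons]
  simp only [show PySem.Chars.isspace ' ' = true from by decide, if_pos]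
  rw [List.dropWhile_cons, if_neg (by simp [hc])]
  obtain ⟨u', z, hu'⟩ := (List.eq_nil_or_concat (c :: t)).resolve_left (by simp)
  rw [List.concat_eq_append] at hu'
  rw [hu']
  have hz : PySem.Chars.isspace z = false := by
    have h' := hlast
    rw [hu', pvGetLastD_append _ _ _ (by simp)] at h'
    simpa using h'
  simp [hz]

theorem pvCatseg_flat (ps : List (Int × List Char)) :
    pvCatseg ps = (pvParts ps).flatMap (fun x => ' ' :: x) := by
  induction ps with
  | nil => rfl
  | cons p l ih =>
    by_cases h : p.1 = 0
    · simp [pvCatseg, pvParts, pvOptseg, h] at ih ⊢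
      simpa [pvCatseg, pvParts] using ih
    · simp [pvCatseg, pvParts, pvOptseg, h] at ih ⊢
      simpa [pvCatseg, pvParts, h] using ih

theorem pvFlat_join (l : List (List Char)) (hne : l ≠ []) :
    l.flatMap (fun x => ' ' :: x) = ' ' :: PySem.Chars.join [' '] l := by
  induction l with
  | nil => exact absurd rfl hne
  | cons a t ih =>
    cases t with
    | nil => simp [PySem.Chars.join_singleton]
    | cons b t' =>
      have h1 : List.flatMap (fun x => ' ' :: x) (a :: b :: t')
          = (' ' :: a) ++ List.flatMap (fun x => ' ' :: x) (b :: t') := by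
        simp
      rw [h1, ih (by simp), PySem.Chars.join_cons_cons]
      simp

-- arithmetic helpers
theorem pvFd_small {s k : Int} (hk : 0 < k) (h0 : 0 ≤ s) (h : s < k) :
    PySem.Int.floordiv s k = 0 := by
  rw [PySem.Int.floordiv_eq_iff_of_pos hk]; constructor <;> nlinarith

theorem pvMod_small {s k : Int} (hk : 0 < k) (h0 : 0 ≤ s) (h : s < k) :
    PySem.Int.mod s k = s := by
  have := PySem.Int.floordiv_mul_add_mod s k
  rw [pvFd_small hk h0 h] at this; linarith

theorem pvFd_ne_zero {s k : Int} (hk : 0 < k) (h : k ≤ s) :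
    PySem.Int.floordiv s k ≠ 0 := by
  have : (1 : Int) ≤ PySem.Int.floordiv s k :=
    (PySem.Int.le_floordiv_iff_mul_le hk).mpr (by linarith)
  omega

theorem pvOptseg_zero (u : List Char) : pvOptseg 0 u = [] := by simp [pvOptseg]

theorem pvOptseg_ne {v : Int} (u : List Char) (h : v ≠ 0) :
    pvOptseg v u = ' ' :: pvFmtB (v, u) := by simp [pvOptseg, h]

-- A's loop characterised level by level
theorem pvLoopA_sec (f : List Char) (s : Int) (_h0 : 0 ≤ s) (h : s < 60) :
    pvLoopA f s = f ++ pvOptseg s ['秒'] := by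
  rw [pvLoopA]
  by_cases hz : s = 0
  · rw [dif_pos hz, hz, pvOptseg_zero, List.append_nil]
  · rw [dif_neg hz, dif_pos h, pvOptseg_ne _ hz]
    simp only [pvFmtB, List.cons_append, List.append_assoc]

theorem pvLoopA_min (f : List Char) (s : Int) (h0 : 0 ≤ s) (h : s < 3600) :
    pvLoopA f s = f ++ (pvOptseg (PySem.Int.floordiv s 60) ['分', '鐘'] ++
      pvOptseg (PySem.Int.mod s 60) ['秒']) := by
  by_cases h60 : s < 60
  · rw [pvLoopA_sec f s h0 h60, pvFd_small (by norm_num) h0 h60,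
      pvMod_small (by norm_num) h0 h60, pvOptseg_zero, List.nil_append]
  · rw [pvLoopA, dif_neg (by omega : ¬ s = 0), dif_neg h60, dif_pos h,
      pvLoopA_sec _ _ (PySem.Int.mod_nonneg s (by norm_num)) (PySem.Int.mod_lt s (by norm_num)),
      pvOptseg_ne (v := PySem.Int.floordiv s 60) _
        (pvFd_ne_zero (by norm_num) (by omega : (60:Int) ≤ s))]
    simp only [pvFmtB, List.cons_append, List.append_assoc]

theorem pvLoopA_hour (f : List Char) (s : Int) (h0 : 0 ≤ s) (h : s < 86400) :
    pvLoopA f s = f ++ (pvOptseg (PySem.Int.floordiv s 3600) ['小', '時'] ++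
      (pvOptseg (PySem.Int.floordiv (PySem.Int.mod s 3600) 60) ['分', '鐘'] ++
       pvOptseg (PySem.Int.mod (PySem.Int.mod s 3600) 60) ['秒'])) := by
  by_cases h36 : s < 3600
  · rw [pvLoopA_min f s h0 h36, pvFd_small (by norm_num) h0 h36,
      pvMod_small (by norm_num) h0 h36, pvOptseg_zero, List.nil_append]
  · rw [pvLoopA, dif_neg (by omega : ¬ s = 0), dif_neg (by omega : ¬ s < 60), dif_neg h36,
      dif_pos h,
      pvLoopA_min _ _ (PySem.Int.mod_nonneg s (by norm_num)) (PySem.Int.mod_lt s (by norm_num)),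
      pvOptseg_ne (v := PySem.Int.floordiv s 3600) _
        (pvFd_ne_zero (by norm_num) (by omega : (3600:Int) ≤ s))]
    simp only [pvFmtB, List.cons_append, List.append_assoc]

theorem pvLoopA_day (f : List Char) (s : Int) (h0 : 0 ≤ s) :
    pvLoopA f s = f ++ pvCatseg
      [(PySem.Int.floordiv s 86400, ['天']),
       (PySem.Int.floordiv (PySem.Int.mod s 86400) 3600, ['小', '時']),
       (PySem.Int.floordiv (PySem.Int.mod (PySem.Int.mod s 86400) 3600) 60, ['分', '鐘']),
       (PySem.Int.mod (PySem.Int.mod (PySem.Int.mod s 86400) 3600) 60, ['秒'])] := by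
  simp only [pvCatseg, List.foldr_cons, List.foldr_nil, List.append_nil]
  by_cases h86 : s < 86400
  · rw [pvLoopA_hour f s h0 h86, pvFd_small (by norm_num) h0 h86,
      pvMod_small (by norm_num) h0 h86, pvOptseg_zero, List.nil_append]
  · rw [pvLoopA, dif_neg (by omega : ¬ s = 0), dif_neg (by omega : ¬ s < 60),
      dif_neg (by omega : ¬ s < 3600), dif_neg h86,
      pvLoopA_hour _ _ (PySem.Int.mod_nonneg s (by norm_num)) (PySem.Int.mod_lt s (by norm_num)),
      pvOptseg_ne (v := PySem.Int.floordiv s 86400) _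
        (pvFd_ne_zero (by norm_num) (by omega : (86400:Int) ≤ s))]
    simp only [pvFmtB, List.cons_append, List.append_assoc]

theorem pvGood_all_parts (ps : List (Int × List Char))
    (hu : ∀ p ∈ ps, p.2 ≠ [] ∧ PySem.Chars.isspace (p.2.getLastD 'x') = false) :
    ∀ q ∈ pvParts ps, pvGood q := by
  intro q hq
  obtain ⟨p, hp, rfl⟩ := List.mem_map.mp hq
  have hp' : p ∈ ps := List.mem_of_mem_filter hp
  obtain ⟨h1, h2⟩ := hu p hp'
  exact pvGood_fmt p.1 p.2 h1 h2

-- ===== VERDICT (by name: the statement is the Claim_ definition above) =====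
theorem get_time_text_spec : Claim_equal_get_time_text := by
  intro s _
  unfold Spec_get_time_text get_time_text get_time_text_alt
  dsimp only
  by_cases h60 : s < 60
  · by_cases hz : s = 0
    · subst hz
      rw [pvLoopA]
      norm_num
      rfl
    · have hg : pvGood (PySem.Int.toChars s ++ ' ' :: ['秒']) :=
        pvGood_fmt s ['秒'] (by simp) (by decide)
      by_cases hneg : s < 0
      · rw [pvLoopA, dif_neg hz, dif_pos h60, List.nil_append,
          show (' ' :: PySem.Int.toChars s ++ ' ' :: ['秒'])
            = ' ' :: (PySem.Int.toChars s ++ ' ' :: ['秒']) by simp,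
          pvStrip_space_cons _ hg, if_pos h60, if_pos hz]
        rfl
      · rw [pvLoopA_sec [] s (by omega) h60, List.nil_append, pvOptseg_ne _ hz,
          pvStrip_space_cons _ (by exact pvGood_fmt s ['秒'] (by simp) (by decide)),
          if_pos h60, if_pos hz]
  · have h0 : 0 ≤ s := by omega
    rw [pvLoopA_day [] s h0, List.nil_append, if_neg h60]
    set lst : List (Int × List Char) :=
      [(PySem.Int.floordiv s 86400, ['天']),
       (PySem.Int.floordiv (PySem.Int.mod s 86400) 3600, ['小', '時']),
       (PySem.Int.floordiv (PySem.Int.mod (PySem.Int.mod s 86400) 3600) 60, ['分', '鐘']),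
       (PySem.Int.mod (PySem.Int.mod (PySem.Int.mod s 86400) 3600) 60, ['秒'])] with hlst
    have hfold : lst.foldl (fun acc p => if p.1 ≠ 0 then acc ++ [pvFmtB p] else acc) []
        = pvParts lst := by
      have := PySem.List.foldl_append_if (fun p : Int × List Char => decide (p.1 ≠ 0)) pvFmtB lst []
      simpa [pvParts] using this
    rw [hfold]
    have hne : pvParts lst ≠ [] := by
      obtain ⟨q, hqm, hq1⟩ : ∃ q, q ∈ lst ∧ q.1 ≠ 0 := by
        by_cases h86 : s < 86400
        · by_cases h36 : s < 3600
          · refine ⟨(PySem.Int.floordiv (PySem.Int.mod (PySem.Int.mod s 86400) 3600) 60,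
              ['分', '鐘']), by simp [hlst], ?_⟩
            rw [pvMod_small (by norm_num) h0 h86, pvMod_small (by norm_num) h0 h36]
            exact pvFd_ne_zero (by norm_num) (by omega)
          · refine ⟨(PySem.Int.floordiv (PySem.Int.mod s 86400) 3600, ['小', '時']),
              by simp [hlst], ?_⟩
            rw [pvMod_small (by norm_num) h0 h86]
            exact pvFd_ne_zero (by norm_num) (by omega)
        · exact ⟨(PySem.Int.floordiv s 86400, ['天']), by simp [hlst],
            pvFd_ne_zero (by norm_num) (by omega)⟩
      exact List.ne_nil_of_mem (List.mem_map_of_mem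
        (List.mem_filter.mpr ⟨hqm, by simpa using hq1⟩))
    have hgood : ∀ q ∈ pvParts lst, pvGood q := by
      apply pvGood_all_parts
      intro p hp
      rw [hlst] at hp
      simp only [List.mem_cons, List.not_mem_nil, or_false] at hp
      rcases hp with rfl | rfl | rfl | rfl
      · exact ⟨by simp, by dsimp only; decide⟩
      · exact ⟨by simp, by dsimp only; decide⟩
      · exact ⟨by simp, by dsimp only; decide⟩
      · exact ⟨by simp, by dsimp only; decide⟩
    rw [pvCatseg_flat, pvFlat_join _ hne,
      pvStrip_space_cons _ (pvGood_join _ hne hgood)]
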